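-- pv_equiv track=rewrite | github.com/ahmedgh970/NeRV- | model_mamba.py | generate_tuples
-- ===== SOURCE A (Python) =====
-- def generate_tuples(strides, patch_size):
--     p1, p2 = patch_size
--     patch_sizes = [(p1, p2)]
--     cum_prod = 1
--     for num in strides[:-1]:
--         cum_prod *= num
--         patch_sizes.append((cum_prod * p1, cum_prod * p2))
--     return patch_sizes
-- ===== SOURCE B (Python) =====
-- def generate_tuples(strides, patch_size):
--     p1, p2 = patch_size
--     if len(strides) <= 1:
--         return [(p1, p2)]
--     rest = generate_tuples(strides[1:], patch_size)
--     return [(p1, p2)] + [(strides[0] * a, strides[0] * b) for (a, b) in rest]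
-- ===== Notes on version B (the rewrite author's own statement) =====
-- stated objective: alternative
-- what changed: Replaces the iterative loop carrying a running prefix product with structural recursion on the strides list: the result for s0::rest is (p1,p2) followed by the recursive result for rest with every tuple scaled by s0, so no running product is maintained at all.
import Mathlib
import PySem

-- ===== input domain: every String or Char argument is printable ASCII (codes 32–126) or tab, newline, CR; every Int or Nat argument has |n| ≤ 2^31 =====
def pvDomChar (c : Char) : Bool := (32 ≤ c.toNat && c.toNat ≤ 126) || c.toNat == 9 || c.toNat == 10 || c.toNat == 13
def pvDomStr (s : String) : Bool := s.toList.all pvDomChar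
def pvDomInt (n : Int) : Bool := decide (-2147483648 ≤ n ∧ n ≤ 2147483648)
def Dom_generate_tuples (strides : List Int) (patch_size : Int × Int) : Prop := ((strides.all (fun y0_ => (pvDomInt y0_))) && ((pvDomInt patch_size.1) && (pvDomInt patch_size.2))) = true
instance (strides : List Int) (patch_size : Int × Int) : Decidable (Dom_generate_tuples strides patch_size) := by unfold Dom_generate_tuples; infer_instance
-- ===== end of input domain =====

-- B builds the list by structural recursion on strides (prepend the base tuple, scale the recursive
-- result by the head stride) instead of A's iterative loop with a running prefix product; same result,
-- different decomposition. Neither program mutates its arguments.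

-- ===== PORT A =====
def generate_tuples (strides : List Int) (patch_size : Int × Int) : List (Int × Int) :=
  let p1 := patch_size.1
  let p2 := patch_size.2
  let r := (PySem.List.slice strides none (some (-1))).foldl
    (fun (st : List (Int × Int) × Int) num =>
      let cum_prod := st.2 * num
      (st.1 ++ [(cum_prod * p1, cum_prod * p2)], cum_prod))
    ([(p1, p2)], (1 : Int))
  r.1

-- ===== PORT B =====
def generate_tuples_alt (strides : List Int) (patch_size : Int × Int) : List (Int × Int) :=
  match strides with
  | [] => [(patch_size.1, patch_size.2)]
  | [_] => [(patch_size.1, patch_size.2)]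
  | s0 :: rest =>
    (patch_size.1, patch_size.2) ::
      (generate_tuples_alt rest patch_size).map (fun t => (s0 * t.1, s0 * t.2))

-- ===== PRECONDITION & SPEC =====
def Spec_generate_tuples (strides : List Int) (patch_size : Int × Int) (out : List (Int × Int)) : Prop := out = generate_tuples_alt strides patch_size
instance (strides : List Int) (patch_size : Int × Int) (out : List (Int × Int)) : Decidable (Spec_generate_tuples strides patch_size out) := by unfold Spec_generate_tuples; infer_instance

-- ===== CLAIM =====
def Claim_equal_generate_tuples : Prop := ∀ (strides : List Int) (patch_size : Int × Int), Dom_generate_tuples strides patch_size → Spec_generate_tuples strides patch_size (generate_tuples strides patch_size)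

-- ===== LEMMAS AND PROOFS =====

-- The tuples A's loop appends when the running product starts at c.
def pvH (p1 p2 : Int) : List Int → Int → List (Int × Int)
  | [], _ => []
  | x :: xs, c => ((c * x) * p1, (c * x) * p2) :: pvH p1 p2 xs (c * x)

-- A's fused fold, started from any accumulator, appends exactly pvH.
theorem pvA_fold (p1 p2 : Int) (xs : List Int) :
    ∀ (acc : List (Int × Int)) (c : Int),
    (xs.foldl
      (fun (st : List (Int × Int) × Int) num =>
        let cum_prod := st.2 * num
        (st.1 ++ [(cum_prod * p1, cum_prod * p2)], cum_prod))
      (acc, c)).1 = acc ++ pvH p1 p2 xs c := by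
  induction xs with
  | nil => intro acc c; simp [pvH]
  | cons x xs ih =>
    intro acc c
    simp only [List.foldl_cons, pvH]
    rw [ih]
    simp

-- Scaling the start of the running product scales every produced tuple.
theorem pvH_scale (p1 p2 : Int) (xs : List Int) :
    ∀ (c d : Int), pvH p1 p2 xs (d * c) = (pvH p1 p2 xs c).map (fun t => (d * t.1, d * t.2)) := by
  induction xs with
  | nil => intro c d; simp [pvH]
  | cons x xs ih =>
    intro c d
    simp only [pvH, List.map_cons, Prod.mk.injEq, List.cons.injEq]
    refine ⟨⟨by ring, by ring⟩, ?_⟩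
    have h := ih (c * x) d
    rw [← h]; ring_nf

-- B's recursion equals the base tuple followed by pvH over strides.dropLast started at 1.
theorem pvB_eq (p : Int × Int) : ∀ (strides : List Int),
    generate_tuples_alt strides p = (p.1, p.2) :: pvH p.1 p.2 strides.dropLast 1 := by
  intro strides
  induction strides with
  | nil => simp [generate_tuples_alt, pvH]
  | cons a t ih =>
    cases t with
    | nil => simp [generate_tuples_alt, pvH]
    | cons b t' =>
      simp only [generate_tuples_alt, ih]
      have hdl : (a :: b :: t').dropLast = a :: (b :: t').dropLast := rfl
      rw [hdl]
      simp only [pvH, List.map_cons, one_mul, List.cons.injEq]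
      refine ⟨trivial, trivial, ?_⟩
      have h := pvH_scale p.1 p.2 (b :: t').dropLast 1 a
      simpa using h.symm

-- ===== VERDICT =====
theorem generate_tuples_spec : Claim_equal_generate_tuples := by
  intro strides patch_size _
  unfold Spec_generate_tuples generate_tuples
  rw [PySem.List.slice_to_neg_one, pvA_fold, pvB_eq]
  rfl
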